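-- pv_equiv track=rewrite | github.com/abdulmunimjemal/Competititve-Programming | leetcode/TargetIndice.py | targetIndices
-- ===== SOURCE A (Python) =====
-- from typing import List
--
-- def targetIndices(nums: List[int], target: int) -> List[int]:
--     index = len(nums)
--     for i in range(index):
--         min = nums[i]
--         for j in range(i, index):
--             if nums[j] < nums[i]:
--                 nums[j], nums[i] = nums[i], nums[j]
--     result = []
--     i = 0
--     for num in nums:
--         if num == target:
--             result.append(i)
--         i += 1
--     return result
-- ===== SOURCE B (Python) =====
-- def targetIndices(nums, target):
--     # Count-based O(n): in the sorted array the targets occupy one consecutive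
--     # index block starting after all smaller elements.
--     less = sum(1 for x in nums if x < target)
--     eq = nums.count(target)
--     return list(range(less, less + eq))
-- ===== Notes on version B (the rewrite author's own statement) =====
-- stated objective: faster
-- what changed: Replaces A's in-place O(n^2) selection sort followed by an index scan with a single counting pass: the answer is range(less, less+eq) where less = #elements < target and eq = #elements == target; B also does not mutate the caller's list, while A sorts it in place (the proved equivalence is about the return value).
import Mathlib
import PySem

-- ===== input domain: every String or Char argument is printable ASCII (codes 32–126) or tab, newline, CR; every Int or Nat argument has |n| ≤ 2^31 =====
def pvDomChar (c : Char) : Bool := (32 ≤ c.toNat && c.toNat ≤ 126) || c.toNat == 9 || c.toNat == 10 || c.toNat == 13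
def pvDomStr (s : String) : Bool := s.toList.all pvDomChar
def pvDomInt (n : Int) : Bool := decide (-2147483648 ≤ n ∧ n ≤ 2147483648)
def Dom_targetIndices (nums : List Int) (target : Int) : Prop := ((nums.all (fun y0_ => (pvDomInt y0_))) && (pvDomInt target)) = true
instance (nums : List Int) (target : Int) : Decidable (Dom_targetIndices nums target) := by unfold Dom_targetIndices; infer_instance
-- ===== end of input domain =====

-- B replaces A's in-place O(n^2) selection sort + index scan by one counting pass
-- (range(less, less+eq)); A sorts the caller's list in place, B does not mutate it:
-- the equivalence proved here is about the return value only.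


-- ===== PORT A =====
-- inner-loop body: `if nums[j] < nums[i]: nums[j], nums[i] = nums[i], nums[j]`
-- (indices i, j come from range(len(nums)) so are always in range; getD is exact there)
def pvInnerStep (i : Nat) (l : List Int) (j : Nat) : List Int :=
  if l.getD j 0 < l.getD i 0 then (l.set j (l.getD i 0)).set i (l.getD j 0) else l

-- `for j in range(i, index)`  (the local `min = nums[i]` in A is dead and has no port)
def pvInner (n i : Nat) (l : List Int) : List Int :=
  (List.range' i (n - i)).foldl (pvInnerStep i) l

-- final scan: `result = []; i = 0; for num in nums: if num == target: result.append(i); i += 1`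
def pvScanStep (target : Int) (st : List Int × Int) (num : Int) : List Int × Int :=
  (if num = target then st.1 ++ [st.2] else st.1, st.2 + 1)

def targetIndices (nums : List Int) (target : Int) : List Int :=
  let index := nums.length
  let l := (List.range index).foldl (fun l i => pvInner index i l) nums
  (l.foldl (pvScanStep target) ([], 0)).1

-- ===== PORT B =====
def targetIndices_alt (nums : List Int) (target : Int) : List Int :=
  let less : Int := nums.foldl (fun acc x => if x < target then acc + 1 else acc) 0
  let eq : Int := PySem.List.count nums target
  PySem.List.pyRange less (less + eq) 1

-- ===== PRECONDITION & SPEC =====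
def Spec_targetIndices (nums : List Int) (target : Int) (out : List Int) : Prop := out = targetIndices_alt nums target
instance (nums : List Int) (target : Int) (out : List Int) : Decidable (Spec_targetIndices nums target out) := by unfold Spec_targetIndices; infer_instance

-- ===== CLAIM (what is proved, stated in full; the proofs are below) =====
def Claim_equal_targetIndices : Prop := ∀ (nums : List Int) (target : Int), Dom_targetIndices nums target → Spec_targetIndices nums target (targetIndices nums target)

-- ===== LEMMAS AND PROOFS =====

-- functional form of one inner-loop pass: carry the current minimum through the suffix
def pvSel (m : Int) (xs : List Int) : Int × List Int :=
  match xs with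
  | [] => (m, [])
  | x :: xs => if x < m then ((pvSel x xs).1, m :: (pvSel x xs).2)
               else ((pvSel m xs).1, x :: (pvSel m xs).2)

theorem pvSel_perm (m : Int) (xs : List Int) :
    ((pvSel m xs).1 :: (pvSel m xs).2).Perm (m :: xs) := by
  induction xs generalizing m with
  | nil => simp [pvSel]
  | cons x xs ih =>
    by_cases h : x < m
    · simp only [pvSel, if_pos h]
      exact (List.Perm.swap _ _ _).trans ((ih x).cons m)
    · simp only [pvSel, if_neg h]
      exact ((List.Perm.swap _ _ _).trans ((ih m).cons x)).trans (List.Perm.swap m x xs)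

theorem pvSel_min (m : Int) (xs : List Int) :
    (pvSel m xs).1 ≤ m ∧ ∀ x ∈ (pvSel m xs).2, (pvSel m xs).1 ≤ x := by
  induction xs generalizing m with
  | nil => simp [pvSel]
  | cons x xs ih =>
    by_cases h : x < m
    · simp only [pvSel, if_pos h]
      refine ⟨le_trans (ih x).1 h.le, ?_⟩
      intro y hy
      rcases List.mem_cons.mp hy with rfl | hy
      · exact le_trans (ih x).1 h.le
      · exact (ih x).2 y hy
    · simp only [pvSel, if_neg h]
      refine ⟨(ih m).1, ?_⟩
      intro y hy
      rcases List.mem_cons.mp hy with rfl | hy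
      · exact le_trans (ih m).1 (not_lt.mp h)
      · exact (ih m).2 y hy

theorem pvSel_length (m : Int) (xs : List Int) : (pvSel m xs).2.length = xs.length := by
  have := (pvSel_perm m xs).length_eq
  simpa using this

-- list surgery facts used to unroll the indexed inner loop
theorem pv_getD_mid (pre s : List Int) (a : Int) :
    (pre ++ a :: s).getD pre.length 0 = a := by
  simp [List.getD]

theorem pv_set_mid (pre s : List Int) (a b : Int) :
    (pre ++ a :: s).set pre.length b = pre ++ b :: s := by
  rw [List.set_append]
  simp

theorem pv_inner_go (pre : List Int) (xs : List Int) :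
    ∀ (done : List Int) (cur : Int),
    (List.range' (pre.length + 1 + done.length) xs.length).foldl (pvInnerStep pre.length)
      (pre ++ cur :: (done ++ xs))
    = pre ++ (pvSel cur xs).1 :: (done ++ (pvSel cur xs).2) := by
  induction xs with
  | nil => intro done cur; simp [pvSel]
  | cons x rest ih =>
    intro done cur
    have hlen : (pre ++ cur :: done).length = pre.length + 1 + done.length := by
      simp; omega
    have hget_i : (pre ++ cur :: (done ++ x :: rest)).getD pre.length 0 = cur :=
      pv_getD_mid pre _ cur
    have hget_j : (pre ++ cur :: (done ++ x :: rest)).getD (pre.length + 1 + done.length) 0 = x := by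
      have : pre ++ cur :: (done ++ x :: rest) = (pre ++ cur :: done) ++ x :: rest := by simp
      rw [this, ← hlen]
      exact pv_getD_mid _ _ x
    simp only [List.length_cons]
    rw [List.range'_succ, List.foldl_cons]
    by_cases hlt : x < cur
    · have hstep : pvInnerStep pre.length (pre ++ cur :: (done ++ x :: rest))
          (pre.length + 1 + done.length) = pre ++ x :: ((done ++ [cur]) ++ rest) := by
        unfold pvInnerStep
        rw [hget_i, hget_j, if_pos hlt]
        have h1 : (pre ++ cur :: (done ++ x :: rest)).set (pre.length + 1 + done.length) cur
            = pre ++ cur :: (done ++ cur :: rest) := by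
          have he : pre ++ cur :: (done ++ x :: rest) = (pre ++ cur :: done) ++ x :: rest := by simp
          rw [he, ← hlen, pv_set_mid]
          simp
        rw [h1, pv_set_mid]
        simp
      rw [hstep]
      have hrec := ih (done ++ [cur]) x
      have harith : pre.length + 1 + done.length + 1 = pre.length + 1 + (done ++ [cur]).length := by
        simp only [List.length_append, List.length_singleton]; omega
      rw [harith, hrec]
      simp [pvSel, hlt]
    · have hstep : pvInnerStep pre.length (pre ++ cur :: (done ++ x :: rest))
          (pre.length + 1 + done.length) = pre ++ cur :: ((done ++ [x]) ++ rest) := by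
        unfold pvInnerStep
        rw [hget_i, hget_j, if_neg hlt]
        simp
      rw [hstep]
      have hrec := ih (done ++ [x]) cur
      have harith : pre.length + 1 + done.length + 1 = pre.length + 1 + (done ++ [x]).length := by
        simp only [List.length_append, List.length_singleton]; omega
      rw [harith, hrec]
      simp [pvSel, hlt]

theorem pv_inner_spec (pre : List Int) (cur : Int) (xs : List Int) :
    pvInner (pre ++ cur :: xs).length pre.length (pre ++ cur :: xs)
    = pre ++ (pvSel cur xs).1 :: (pvSel cur xs).2 := by
  unfold pvInner
  have hn : (pre ++ cur :: xs).length - pre.length = xs.length + 1 := by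
    simp only [List.length_append, List.length_cons]; omega
  rw [hn, List.range'_succ, List.foldl_cons]
  have hfirst : pvInnerStep pre.length (pre ++ cur :: xs) pre.length = pre ++ cur :: xs := by
    unfold pvInnerStep
    rw [pv_getD_mid]
    simp
  rw [hfirst]
  have := pv_inner_go pre xs [] cur
  simpa using this

-- outer loop: turns the suffix into a sorted permutation of itself
theorem pv_outer_go (nums : List Int) :
    ∀ (k : Nat) (rest pre : List Int),
    rest.length = k →
    pre.length + rest.length = nums.length →
    pre.Pairwise (· ≤ ·) →
    (∀ a ∈ pre, ∀ b ∈ rest, a ≤ b) →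
    ∃ s : List Int,
      (List.range' pre.length rest.length).foldl (fun l i => pvInner nums.length i l) (pre ++ rest)
        = pre ++ s ∧ s.Perm rest ∧ s.Pairwise (· ≤ ·) ∧ (∀ a ∈ pre, ∀ b ∈ s, a ≤ b) := by
  intro k
  induction k with
  | zero =>
    intro rest pre hk h1 h2 h3
    have hnil : rest = [] := List.eq_nil_of_length_eq_zero hk
    subst hnil
    exact ⟨[], by simp, List.Perm.refl _, by simp, by simp⟩
  | succ k ihk =>
    intro rest pre hk h1 h2 h3
    cases rest with
    | nil => simp at hk
    | cons m xs =>
      rw [List.length_cons, List.range'_succ, List.foldl_cons]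
      have hlen : nums.length = (pre ++ m :: xs).length := by
        simp only [List.length_append, List.length_cons] at h1 ⊢; omega
      rw [hlen, pv_inner_spec pre m xs]
      set r := (pvSel m xs).1 with hr
      set ys := (pvSel m xs).2 with hys
      have hperm : (r :: ys).Perm (m :: xs) := pvSel_perm m xs
      have hmin := pvSel_min m xs
      have hylen : ys.length = xs.length := pvSel_length m xs
      have hmem_r : r ∈ m :: xs := hperm.mem_iff.mp (List.mem_cons_self)
      have hpre' : (pre ++ [r]).Pairwise (· ≤ ·) := by
        rw [List.pairwise_append]
        exact ⟨h2, by simp, by intro a ha b hb; simp at hb; subst hb; exact h3 a ha r hmem_r⟩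
      have hle' : ∀ a ∈ pre ++ [r], ∀ b ∈ ys, a ≤ b := by
        intro a ha b hb
        have hbmem : b ∈ m :: xs := hperm.mem_iff.mp (List.mem_cons_of_mem _ hb)
        rcases List.mem_append.mp ha with ha | ha
        · exact h3 a ha b hbmem
        · simp at ha; subst ha; exact hmin.2 b hb
      have hk' : ys.length = k := by
        rw [hylen]; simp only [List.length_cons] at hk; omega
      have hlen' : (pre ++ [r]).length + ys.length = nums.length := by
        simp only [List.length_append, List.length_cons,
          List.length_nil, hylen] at h1 ⊢
        omega
      obtain ⟨s', hfold, hsperm, hspw, hsle⟩ := ihk ys (pre ++ [r]) hk' hlen' hpre' hle'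
      refine ⟨r :: s', ?_, ?_, ?_, ?_⟩
      · have hidx : pre.length + 1 = (pre ++ [r]).length := by simp
        rw [← hlen, ← hylen, hidx]
        have hassoc : pre ++ r :: ys = (pre ++ [r]) ++ ys := by simp
        rw [hassoc, hfold]
        simp
      · exact ((hsperm.cons r).trans hperm)
      · rw [List.pairwise_cons]
        refine ⟨fun b hb => ?_, hspw⟩
        exact hmin.2 b (hsperm.mem_iff.mp hb)
      · intro a ha b hb
        rcases List.mem_cons.mp hb with rfl | hb
        · exact h3 a ha _ hmem_r
        · exact hsle a (by simp [ha]) b hb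

theorem pv_sorted_perm (nums : List Int) :
    ∃ s : List Int,
      (List.range nums.length).foldl (fun l i => pvInner nums.length i l) nums = s ∧
      s.Perm nums ∧ s.Pairwise (· ≤ ·) := by
  obtain ⟨s, hfold, hperm, hpw, _⟩ :=
    pv_outer_go nums nums.length nums [] rfl (by simp) (by simp) (by simp)
  refine ⟨s, ?_, hperm, hpw⟩
  rw [List.range_eq_range']
  simpa using hfold

-- decomposition of a sorted list around the target
theorem pv_decomp (t : Int) (S : List Int) (h : S.Pairwise (· ≤ ·)) :
    ∃ P Q R : List Int, S = P ++ Q ++ R ∧ (∀ a ∈ P, a < t) ∧ (∀ a ∈ Q, a = t) ∧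
      (∀ a ∈ R, t < a) := by
  induction S with
  | nil => exact ⟨[], [], [], by simp, by simp, by simp, by simp⟩
  | cons x rest ih =>
    rw [List.pairwise_cons] at h
    obtain ⟨P, Q, R, hS, hP, hQ, hR⟩ := ih h.2
    rcases lt_trichotomy x t with hx | hx | hx
    · refine ⟨x :: P, Q, R, by simp [hS], ?_, hQ, hR⟩
      intro a ha; rcases List.mem_cons.mp ha with rfl | ha; exact hx; exact hP a ha
    · subst hx
      have hPnil : P = [] := by
        cases P with
        | nil => rfl
        | cons p ps =>
          exfalso
          have hple := h.1 p (by rw [hS]; simp)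
          exact absurd (hP p (by simp)) (not_lt.mpr hple)
      refine ⟨[], x :: Q, R, by simp [hS, hPnil], by simp, ?_, hR⟩
      intro a ha; rcases List.mem_cons.mp ha with rfl | ha; rfl; exact hQ a ha
    · have hPnil : P = [] := by
        cases P with
        | nil => rfl
        | cons p ps =>
          exfalso
          have hple := h.1 p (by rw [hS]; simp)
          have := hP p (by simp)
          omega
      have hQnil : Q = [] := by
        cases Q with
        | nil => rfl
        | cons q qs =>
          exfalso
          have hqle := h.1 q (by rw [hS]; simp)
          have := hQ q (by simp)
          omega
      refine ⟨[], [], x :: R, by simp [hS, hPnil, hQnil], by simp, by simp, ?_⟩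
      intro a ha; rcases List.mem_cons.mp ha with rfl | ha; exact hx; exact hR a ha

-- the final scan on a block with no target
theorem pv_scan_ne (t : Int) (l : List Int) (h : ∀ x ∈ l, x ≠ t) :
    ∀ (acc : List Int) (i0 : Int),
    l.foldl (pvScanStep t) (acc, i0) = (acc, i0 + l.length) := by
  induction l with
  | nil => intro acc i0; simp
  | cons x xs ih =>
    intro acc i0
    rw [List.foldl_cons]
    have hx : x ≠ t := h x (by simp)
    simp only [pvScanStep, if_neg hx]
    rw [ih (fun y hy => h y (by simp [hy])) acc (i0 + 1)]
    simp; ring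

-- the final scan on an all-target block
theorem pv_scan_eq (t : Int) (l : List Int) (h : ∀ x ∈ l, x = t) :
    ∀ (acc : List Int) (i0 : Int),
    l.foldl (pvScanStep t) (acc, i0)
      = (acc ++ (List.range l.length).map (fun k : Nat => i0 + (k : Int)), i0 + l.length) := by
  induction l with
  | nil => intro acc i0; simp
  | cons x xs ih =>
    intro acc i0
    rw [List.foldl_cons]
    have hx : x = t := h x (by simp)
    simp only [pvScanStep, if_pos hx]
    rw [ih (fun y hy => h y (by simp [hy])) (acc ++ [i0]) (i0 + 1)]
    have hmap : (List.range (x :: xs).length).map (fun k : Nat => i0 + (k : Int))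
        = i0 :: (List.range xs.length).map (fun k : Nat => (i0 + 1) + (k : Int)) := by
      rw [List.length_cons, List.range_succ_eq_map, List.map_cons, List.map_map]
      simp only [Nat.cast_zero, add_zero]
      congr 1
      apply List.map_congr_left
      intro k _
      simp only [Function.comp_apply]
      push_cast
      ring
    rw [hmap]
    simp only [Prod.mk.injEq]
    constructor
    · simp
    · simp only [List.length_cons]; push_cast; ring

-- B's `less` fold is a countP
theorem pv_less_count (t : Int) (l : List Int) :
    ∀ acc : Int, l.foldl (fun acc x => if x < t then acc + 1 else acc) acc
      = acc + (l.countP (fun x => decide (x < t)) : Int) := by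
  induction l with
  | nil => intro acc; simp
  | cons x xs ih =>
    intro acc
    rw [List.foldl_cons, List.countP_cons]
    by_cases hx : x < t
    · rw [if_pos hx, ih]; simp [hx]; ring
    · rw [if_neg hx, ih]; simp [hx]

theorem pv_main (nums : List Int) (t : Int) :
    targetIndices nums t = targetIndices_alt nums t := by
  unfold targetIndices targetIndices_alt
  obtain ⟨S, hfold, hperm, hpw⟩ := pv_sorted_perm nums
  simp only []
  rw [hfold]
  obtain ⟨P, Q, R, hS, hP, hQ, hR⟩ := pv_decomp t S hpw
  -- the scan over S = P ++ Q ++ R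
  have hPne : ∀ x ∈ P, x ≠ t := fun x hx => ne_of_lt (hP x hx)
  have hRne : ∀ x ∈ R, x ≠ t := fun x hx => (ne_of_lt (hR x hx)).symm
  have hscan : (S.foldl (pvScanStep t) ([], 0)).1
      = (List.range Q.length).map (fun k : Nat => (P.length : Int) + (k : Int)) := by
    rw [hS, List.foldl_append, List.foldl_append]
    rw [pv_scan_ne t P hPne [] 0, pv_scan_eq t Q hQ, pv_scan_ne t R hRne]
    simp
  rw [hscan]
  -- B's counts
  have hless : nums.foldl (fun acc x => if x < t then acc + 1 else acc) 0
      = (P.length : Int) := by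
    rw [pv_less_count]
    have hcp : nums.countP (fun x => decide (x < t)) = P.length := by
      rw [← hperm.countP_eq, hS]
      rw [List.countP_append, List.countP_append]
      have h1 : P.countP (fun x => decide (x < t)) = P.length :=
        List.countP_eq_length.mpr (fun x hx => by simpa using hP x hx)
      have h2 : Q.countP (fun x => decide (x < t)) = 0 :=
        List.countP_eq_zero.mpr (fun x hx => by simp [hQ x hx])
      have h3 : R.countP (fun x => decide (x < t)) = 0 :=
        List.countP_eq_zero.mpr (fun x hx => by simp; exact le_of_lt (hR x hx))
      rw [h1, h2, h3]; omega
    rw [hcp]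
    simp
  have hcount : PySem.List.count nums t = (Q.length : Int) := by
    rw [PySem.List.count_eq]
    have : List.count t nums = Q.length := by
      rw [← hperm.count_eq, hS]
      simp only [List.count_append]
      have h1 : List.count t P = 0 :=
        List.count_eq_zero.mpr (fun hmem => absurd rfl (hPne t hmem))
      have h2 : List.count t Q = Q.length :=
        List.count_eq_length.mpr (fun x hx => (hQ x hx).symm)
      have h3 : List.count t R = 0 :=
        List.count_eq_zero.mpr (fun hmem => absurd rfl (hRne t hmem))
      rw [h1, h2, h3]; omega
    rw [this]
  rw [hless, hcount, PySem.List.pyRange_one]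
  have : ((P.length : Int) + (Q.length : Int) - (P.length : Int)).toNat = Q.length := by
    omega
  rw [this]

-- ===== VERDICT (by name: the statement is the Claim_ definition above) =====
theorem targetIndices_spec : Claim_equal_targetIndices := by
  intro nums t _
  unfold Spec_targetIndices
  exact pv_main nums t
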